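-- pv_equiv track=rewrite | github.com/helena128/ktop-lab3 | lab.py | rebuild_alpha_matrix
-- ===== SOURCE A (Python) =====
-- def rebuild_alpha_matrix(phis):
--   alpha_matrix = [[0 for x in range(len(phis))] for y in range(len(phis))]
--   for row_idx1 in range(0, len(phis)):
--     phi_row1 = phis[row_idx1]
--     for row_idx2 in range(row_idx1 + 1, len(phis)):
--       phi_row2 = phis[row_idx2]
--       cur_alpha = len(phi_row1) + len(phi_row2) - len(list(set(phi_row1) & set(phi_row2)))
--       alpha_matrix[row_idx1][row_idx2] = cur_alpha
--       alpha_matrix[row_idx2][row_idx1] = cur_alpha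
--   return alpha_matrix
-- ===== SOURCE B (Python) =====
-- def _merge_inter(a, b):
--     # a, b strictly increasing lists; count of common elements by two-pointer merge
--     c = 0
--     p = 0
--     q = 0
--     la = len(a)
--     lb = len(b)
--     while p < la and q < lb:
--         x = a[p]
--         y = b[q]
--         if x == y:
--             c += 1
--             p += 1
--             q += 1
--         elif x < y:
--             p += 1
--         else:
--             q += 1
--     return c
--
--
-- def rebuild_alpha_matrix(phis):
--     keys = [sorted(set(row)) for row in phis]
--     lens = [len(row) for row in phis]
--     n = len(phis)
--     return [[0 if i == j else lens[i] + lens[j] - _merge_inter(keys[i], keys[j])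
--              for j in range(n)]
--             for i in range(n)]
-- ===== Notes on version B (the rewrite author's own statement) =====
-- stated objective: alternative
-- what changed: Replaces A's per-pair hash-set construction and set intersection plus half-matrix in-place mutation by precomputing each row's sorted distinct keys once, counting each pair's intersection with a two-pointer merge over those keys, and building the matrix functionally from the symmetric closed formula.
import Mathlib
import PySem

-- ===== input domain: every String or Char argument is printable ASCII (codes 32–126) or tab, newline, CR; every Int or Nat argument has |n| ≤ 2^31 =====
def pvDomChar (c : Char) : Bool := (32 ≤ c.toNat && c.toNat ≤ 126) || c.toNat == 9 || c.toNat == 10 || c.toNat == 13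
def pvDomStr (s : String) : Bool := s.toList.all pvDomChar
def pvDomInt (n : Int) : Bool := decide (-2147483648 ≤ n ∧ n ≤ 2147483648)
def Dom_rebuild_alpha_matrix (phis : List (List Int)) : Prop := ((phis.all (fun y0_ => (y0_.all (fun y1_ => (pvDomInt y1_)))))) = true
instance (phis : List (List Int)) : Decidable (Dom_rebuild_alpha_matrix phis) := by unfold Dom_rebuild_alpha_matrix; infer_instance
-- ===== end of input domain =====

-- B replaces A's per-pair set intersections and half-matrix in-place fill by per-row sorted
-- distinct keys computed once, a two-pointer merge count per pair, and a functional build of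
-- the symmetric matrix (objective: alternative; not claimed faster).

-- ===== PORT A =====
-- inner-loop body of A: sets alpha_matrix[row_idx1][row_idx2] and alpha_matrix[row_idx2][row_idx1]
-- to cur_alpha.  len(list(set(r1) & set(r2))) is ported as the length of PySem.Set.inter — only the
-- length of the Python list() is used, so this is exact.
def stepA (phis : List (List Int)) (r1 : List Int) (i : Int)
    (mat : List (List Int)) (j : Int) : List (List Int) :=
  let r2 := PySem.List.pyGetD phis j []
  let a : Int := (r1.length : Int) + (r2.length : Int)
      - ((PySem.Set.inter (PySem.Set.ofList r1) (PySem.Set.ofList r2)).length : Int)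
  let mat := PySem.List.pySetD mat i (PySem.List.pySetD (PySem.List.pyGetD mat i []) j a)
  PySem.List.pySetD mat j (PySem.List.pySetD (PySem.List.pyGetD mat j []) i a)

-- outer-loop body of A
def outerA (phis : List (List Int)) (n : Int)
    (mat : List (List Int)) (i : Int) : List (List Int) :=
  let r1 := PySem.List.pyGetD phis i []
  (PySem.List.pyRange (i + 1) n).foldl (stepA phis r1 i) mat

def rebuild_alpha_matrix (phis : List (List Int)) : List (List Int) :=
  let n : Int := phis.length
  let alpha_matrix : List (List Int) :=
    (PySem.List.pyRange 0 n).map (fun _ => (PySem.List.pyRange 0 n).map (fun _ => (0 : Int)))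
  (PySem.List.pyRange 0 n).foldl (outerA phis n) alpha_matrix

-- ===== PORT B =====
-- two-pointer merge count of common elements of two strictly increasing lists
-- (Source B's while loop over indices p, q is transcribed as recursion on the two suffixes)
def mergeInter : List Int → List Int → Int
  | x :: xs, y :: ys =>
    if x = y then 1 + mergeInter xs ys
    else if x < y then mergeInter xs (y :: ys)
    else mergeInter (x :: xs) ys
  | _, _ => 0
termination_by a b => a.length + b.length

def rebuild_alpha_matrix_alt (phis : List (List Int)) : List (List Int) :=
  let keys := phis.map (fun row => PySem.List.sorted (PySem.Set.ofList row) (fun x => x))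
  let lens := phis.map (fun row => (row.length : Int))
  let n : Int := phis.length
  (PySem.List.pyRange 0 n).map (fun i =>
    (PySem.List.pyRange 0 n).map (fun j =>
      if i = j then 0
      else PySem.List.pyGetD lens i 0 + PySem.List.pyGetD lens j 0
        - mergeInter (PySem.List.pyGetD keys i []) (PySem.List.pyGetD keys j [])))

-- ===== PRECONDITION & SPEC =====
def Spec_rebuild_alpha_matrix (phis : List (List Int)) (out : List (List Int)) : Prop := out = rebuild_alpha_matrix_alt phis
instance (phis : List (List Int)) (out : List (List Int)) : Decidable (Spec_rebuild_alpha_matrix phis out) := by unfold Spec_rebuild_alpha_matrix; infer_instance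

-- ===== CLAIM (what is proved, stated in full; the proofs are below) =====
def Claim_equal_rebuild_alpha_matrix : Prop := ∀ (phis : List (List Int)), Dom_rebuild_alpha_matrix phis → Spec_rebuild_alpha_matrix phis (rebuild_alpha_matrix phis)

-- ===== LEMMAS AND PROOFS =====

-- A's cur_alpha for rows i and j
def entA (phis : List (List Int)) (i j : Nat) : Int :=
  ((phis.getD i []).length : Int) + ((phis.getD j []).length : Int)
    - ((PySem.Set.inter (PySem.Set.ofList (phis.getD i []))
        (PySem.Set.ofList (phis.getD j []))).length : Int)

-- the n×n matrix whose (p,q) entry is f p q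
def gmat (n : Nat) (f : Nat → Nat → Int) : List (List Int) :=
  (List.range n).map (fun p => (List.range n).map (fun q => f p q))

-- state of A's matrix after all outer indices < k0 have been processed
def fDone (phis : List (List Int)) (k0 : Int) (p q : Nat) : Int :=
  if p < q ∧ (p : Int) < k0 then entA phis p q
  else if q < p ∧ (q : Int) < k0 then entA phis q p
  else 0

lemma set_map_range {β : Type} (f : Nat → β) (n i : Nat) (v : β) :
    ((List.range n).map f).set i v = (List.range n).map (fun p => if p = i then v else f p) := by
  apply List.ext_getElem
  · simp
  · intro k h1 h2
    simp only [List.getElem_set, List.getElem_map, List.getElem_range]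
    by_cases hk : i = k
    · simp [hk]
    · simp [hk, Ne.symm hk]

lemma getD_gmat {n : Nat} {f : Nat → Nat → Int} {p : Nat} (h : p < n) :
    (gmat n f).getD p [] = (List.range n).map (fun q => f p q) := by
  unfold gmat; exact PySem.List.getD_map_range _ _ _ _ h

lemma gmat_set_row (n : Nat) (f : Nat → Nat → Int) (i : Nat) (g : Nat → Int) :
    (gmat n f).set i ((List.range n).map g)
      = gmat n (fun p q => if p = i then g q else f p q) := by
  unfold gmat
  rw [set_map_range]
  apply List.map_congr_left
  intro p _
  by_cases hp : p = i <;> simp [hp]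

lemma stepA_gmat (phis : List (List Int)) (n : Nat) (f : Nat → Nat → Int)
    (i j : Nat) (hi : i < n) (hj : j < n) (hij : i ≠ j) :
    stepA phis (phis.getD i []) (i : Int) (gmat n f) (j : Int)
      = gmat n (fun p q => if (p = i ∧ q = j) ∨ (p = j ∧ q = i) then entA phis i j else f p q) := by
  unfold stepA
  simp only [PySem.List.pyGetD_natCast, PySem.List.pySetD_natCast]
  rw [getD_gmat hi, set_map_range, gmat_set_row]
  rw [getD_gmat (f := fun p q => if p = i then _ else f p q) hj]
  rw [set_map_range, gmat_set_row]
  apply List.map_congr_left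
  intro p hp
  apply List.map_congr_left
  intro q hq
  rw [List.mem_range] at hp hq
  simp only [entA]
  by_cases h1 : p = j <;> by_cases h2 : q = i <;> by_cases h3 : p = i <;> by_cases h4 : q = j <;>
    simp_all

lemma innerA_gmat (phis : List (List Int)) (n : Nat) :
    ∀ (m : Nat) (j0 : Int) (f : Nat → Nat → Int) (i : Nat), i < n → (i : Int) < j0 →
      m = ((n : Int) - j0).toNat →
    (PySem.List.pyRange j0 (n : Int)).foldl (stepA phis (phis.getD i []) (i : Int)) (gmat n f)
      = gmat n (fun p q =>
          if p = i ∧ j0 ≤ (q : Int) ∧ q < n then entA phis i q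
          else if q = i ∧ j0 ≤ (p : Int) ∧ p < n then entA phis i p
          else f p q) := by
  intro m
  induction m with
  | zero =>
    intro j0 f i hi hij0 hm
    have hnj : (n : Int) ≤ j0 := by omega
    rw [PySem.List.pyRange_one_eq_nil hnj]
    simp only [List.foldl_nil]
    apply List.map_congr_left; intro p hp
    apply List.map_congr_left; intro q hq
    rw [List.mem_range] at hp hq
    beta_reduce
    have h1 : ¬ (p = i ∧ j0 ≤ (q : Int) ∧ q < n) := by rintro ⟨_, h, _⟩; omega
    have h2 : ¬ (q = i ∧ j0 ≤ (p : Int) ∧ p < n) := by rintro ⟨_, h, _⟩; omega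
    rw [if_neg h1, if_neg h2]
  | succ m ih =>
    intro j0 f i hi hij0 hm
    have hj0n : j0 < (n : Int) := by omega
    have h0 : 0 ≤ j0 := by omega
    obtain ⟨jn, rfl⟩ : ∃ jn : Nat, j0 = (jn : Int) := ⟨j0.toNat, by omega⟩
    have hjn : jn < n := by exact_mod_cast hj0n
    have hijn : i ≠ jn := by intro h; subst h; omega
    rw [PySem.List.pyRange_one_cons hj0n, List.foldl_cons]
    rw [stepA_gmat phis n f i jn hi hjn hijn]
    rw [ih ((jn : Int) + 1) _ i hi (by omega) (by omega)]
    apply List.map_congr_left; intro p hp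
    apply List.map_congr_left; intro q hq
    rw [List.mem_range] at hp hq
    beta_reduce
    by_cases e1 : p = i <;> by_cases e2 : q = i <;> by_cases e3 : p = jn <;> by_cases e4 : q = jn <;>
      subst_vars <;> split_ifs <;> first | rfl | omega

lemma outerA_gmat (phis : List (List Int)) (n : Nat) :
    ∀ (m : Nat) (k0 : Int), 0 ≤ k0 → m = ((n : Int) - k0).toNat →
    (PySem.List.pyRange k0 (n : Int)).foldl (outerA phis (n : Int)) (gmat n (fDone phis k0))
      = gmat n (fDone phis (n : Int)) := by
  intro m
  induction m with
  | zero =>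
    intro k0 h0 hm
    rw [PySem.List.pyRange_one_eq_nil (by omega)]
    simp only [List.foldl_nil]
    apply List.map_congr_left; intro p hp
    apply List.map_congr_left; intro q hq
    rw [List.mem_range] at hp hq
    unfold fDone
    split_ifs <;> first | rfl | omega
  | succ m ih =>
    intro k0 h0 hm
    have hk0n : k0 < (n : Int) := by omega
    obtain ⟨kn, rfl⟩ : ∃ kn : Nat, k0 = (kn : Int) := ⟨k0.toNat, by omega⟩
    have hkn : kn < n := by exact_mod_cast hk0n
    rw [PySem.List.pyRange_one_cons hk0n, List.foldl_cons]
    show (PySem.List.pyRange ((kn : Int) + 1) (n : Int)).foldl _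
        (outerA phis (n : Int) (gmat n (fDone phis (kn : Int))) (kn : Int)) = _
    rw [show outerA phis (n : Int) (gmat n (fDone phis (kn : Int))) (kn : Int)
        = (PySem.List.pyRange ((kn : Int) + 1) (n : Int)).foldl
            (stepA phis (phis.getD kn []) (kn : Int)) (gmat n (fDone phis (kn : Int))) from by
      unfold outerA; rw [PySem.List.pyGetD_natCast]]
    rw [innerA_gmat phis n (((n : Int) - ((kn : Int) + 1)).toNat) ((kn : Int) + 1)
        (fDone phis (kn : Int)) kn hkn (by omega) rfl]
    have hstep : (gmat n fun p q =>
          if p = kn ∧ (kn : Int) + 1 ≤ (q : Int) ∧ q < n then entA phis kn q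
          else if q = kn ∧ (kn : Int) + 1 ≤ (p : Int) ∧ p < n then entA phis kn p
          else fDone phis (kn : Int) p q)
        = gmat n (fDone phis ((kn : Int) + 1)) := by
      apply List.map_congr_left; intro p hp
      apply List.map_congr_left; intro q hq
      rw [List.mem_range] at hp hq
      beta_reduce
      unfold fDone
      by_cases e1 : p = kn <;> by_cases e2 : q = kn <;>
        subst_vars <;> split_ifs <;> first | rfl | omega
    rw [hstep]
    exact ih ((kn : Int) + 1) (by omega) (by omega)

lemma rebuildA_eq_gmat (phis : List (List Int)) :
    rebuild_alpha_matrix phis = gmat phis.length (fDone phis (phis.length : Int)) := by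
  unfold rebuild_alpha_matrix
  simp only []
  set n := phis.length with hn
  have hinit : ((PySem.List.pyRange 0 (n : Int)).map
      (fun _ => (PySem.List.pyRange 0 (n : Int)).map (fun _ => (0 : Int))))
      = gmat n (fDone phis 0) := by
    rw [PySem.List.pyRange_zero_nat]
    unfold gmat
    rw [List.map_map, List.map_map]
    apply List.map_congr_left; intro p _
    apply List.map_congr_left; intro q _
    unfold fDone
    split_ifs <;> first | rfl | omega
  rw [hinit]
  exact outerA_gmat phis n (((n : Int) - 0).toNat) 0 le_rfl rfl

lemma mergeInter_filter :
    ∀ a b : List Int, a.Pairwise (· < ·) → b.Pairwise (· < ·) →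
      mergeInter a b = ((a.filter (fun x => decide (x ∈ b))).length : Int) := by
  intro a b ha hb
  induction a, b using mergeInter.induct with
  | case1 xs x ys ih =>
    rw [List.pairwise_cons] at ha hb
    rw [mergeInter, if_pos rfl]
    rw [ih ha.2 hb.2]
    have hfe : xs.filter (fun z => decide (z = x) || decide (z ∈ ys))
        = xs.filter (fun z => decide (z ∈ ys)) := by
      apply List.filter_congr
      intro z hz
      have : x < z := ha.1 z hz
      simp
      omega
    simp [hfe]
    omega
  | case2 x xs y ys hne hlt ih =>
    rw [List.pairwise_cons] at ha
    rw [mergeInter, if_neg hne, if_pos hlt]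
    rw [ih ha.2 hb]
    have hx : ¬ (x = y ∨ x ∈ ys) := by
      rintro (h | h)
      · exact hne h
      · have := (List.pairwise_cons.mp hb).1 x h; omega
    simp [hx]
  | case3 x xs y ys hne hnlt ih =>
    rw [List.pairwise_cons] at hb
    rw [mergeInter, if_neg hne, if_neg hnlt]
    rw [ih ha hb.2]
    congr 2
    apply List.filter_congr
    intro z hz
    have hyz : y < z := by
      rcases List.mem_cons.mp hz with h | h
      · subst h; omega
      · have := (List.pairwise_cons.mp ha).1 z h
        omega
    simp [List.mem_cons]
    omega
  | case4 a b h =>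
    rcases a with _ | ⟨x, xs⟩
    · simp [mergeInter]
    · rcases b with _ | ⟨y, ys⟩
      · simp [mergeInter]
      · exact (h x xs y ys rfl rfl).elim

lemma filter_mem_length_comm (u v : List Int) (hu : u.Nodup) (hv : v.Nodup) :
    (u.filter (fun x => decide (x ∈ v))).length = (v.filter (fun x => decide (x ∈ u))).length := by
  have h : (u.filter (fun x => decide (x ∈ v))).Perm (v.filter (fun x => decide (x ∈ u))) := by
    rw [List.perm_ext_iff_of_nodup (hu.filter _) (hv.filter _)]
    intro a; simp [List.mem_filter, and_comm]
  exact h.length_eq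

lemma mergeInter_sorted_ofList (ra rb : List Int) :
    mergeInter (PySem.List.sorted (PySem.Set.ofList ra) (fun x => x))
        (PySem.List.sorted (PySem.Set.ofList rb) (fun x => x))
      = ((PySem.Set.inter (PySem.Set.ofList ra) (PySem.Set.ofList rb)).length : Int) := by
  set sa := PySem.List.sorted (PySem.Set.ofList ra) (fun x => x) with hsa
  set sb := PySem.List.sorted (PySem.Set.ofList rb) (fun x => x) with hsb
  rw [mergeInter_filter sa sb (PySem.List.sorted_ofList_pairwise_lt ra)
      (PySem.List.sorted_ofList_pairwise_lt rb)]
  congr 1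
  have hmb : ∀ z, z ∈ sb ↔ z ∈ PySem.Set.ofList rb := by
    intro z; rw [hsb, PySem.List.mem_sorted]
  have h1 : sa.filter (fun x => decide (x ∈ sb))
      = sa.filter (fun x => decide (x ∈ PySem.Set.ofList rb)) := by
    apply List.filter_congr; intro z _; simp [hmb z]
  rw [h1]
  have hperm : (sa.filter (fun x => decide (x ∈ PySem.Set.ofList rb))).Perm
      ((PySem.Set.ofList ra).filter (fun x => decide (x ∈ PySem.Set.ofList rb))) :=
    (PySem.List.sorted_perm _ _ _).filter _
  rw [hperm.length_eq]
  show _ = (PySem.Set.inter (PySem.Set.ofList ra) (PySem.Set.ofList rb)).length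
  unfold PySem.Set.inter
  congr 1
  apply List.filter_congr; intro z _
  have := PySem.Set.contains_iff (PySem.Set.ofList rb) z
  by_cases h : z ∈ PySem.Set.ofList rb <;> simp_all

lemma getD_map_of_lt {α β : Type} (f : α → β) (xs : List α) (p : Nat) (h : p < xs.length)
    (d : β) (d' : α) : (xs.map f).getD p d = f (xs.getD p d') := by
  rw [List.getD_eq_getElem _ _ (by simpa using h), List.getD_eq_getElem _ _ h]
  simp

lemma inter_length_comm (ra rb : List Int) :
    ((PySem.Set.inter (PySem.Set.ofList ra) (PySem.Set.ofList rb)).length : Int)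
      = ((PySem.Set.inter (PySem.Set.ofList rb) (PySem.Set.ofList ra)).length : Int) := by
  unfold PySem.Set.inter
  have conv1 : ∀ (u v : List Int), u.filter (fun x => (PySem.Set.ofList v).contains x)
      = u.filter (fun x => decide (x ∈ v)) := by
    intro u v
    apply List.filter_congr; intro z _
    have h1 := PySem.Set.contains_iff (PySem.Set.ofList v) z
    have h2 := PySem.Set.mem_ofList (xs := v) (y := z)
    by_cases h : z ∈ v <;> simp_all
  rw [conv1, conv1]
  have hc := filter_mem_length_comm (PySem.Set.ofList ra) (PySem.Set.ofList rb)
      (PySem.Set.nodup_ofList ra) (PySem.Set.nodup_ofList rb)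
  have conv2 : ∀ (u w : List Int), (PySem.Set.ofList u).filter (fun x => decide (x ∈ w))
      = (PySem.Set.ofList u).filter (fun x => decide (x ∈ PySem.Set.ofList w)) := by
    intro u w
    apply List.filter_congr; intro z _
    have := PySem.Set.mem_ofList (xs := w) (y := z)
    by_cases h : z ∈ w <;> simp_all
  rw [conv2 ra rb, conv2 rb ra]
  exact_mod_cast hc

lemma entA_symm (phis : List (List Int)) (p q : Nat) : entA phis p q = entA phis q p := by
  unfold entA
  rw [inter_length_comm]
  ring

lemma rebuildB_eq_gmat (phis : List (List Int)) :
    rebuild_alpha_matrix_alt phis = gmat phis.length (fDone phis (phis.length : Int)) := by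
  unfold rebuild_alpha_matrix_alt
  simp only []
  set n := phis.length with hn
  rw [PySem.List.pyRange_zero_nat]
  unfold gmat
  rw [List.map_map]
  apply List.map_congr_left; intro p hp
  rw [List.mem_range] at hp
  simp only [Function.comp]
  rw [List.map_map]
  apply List.map_congr_left; intro q hq
  rw [List.mem_range] at hq
  simp only [Function.comp]
  rw [PySem.List.pyGetD_natCast, PySem.List.pyGetD_natCast, PySem.List.pyGetD_natCast,
      PySem.List.pyGetD_natCast]
  rw [getD_map_of_lt _ phis p (hn ▸ hp) _ [], getD_map_of_lt _ phis q (hn ▸ hq) _ [],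
      getD_map_of_lt _ phis p (hn ▸ hp) _ [], getD_map_of_lt _ phis q (hn ▸ hq) _ []]
  unfold fDone
  by_cases hpq : p = q
  · subst hpq
    rw [if_pos rfl]
    rw [if_neg (by omega), if_neg (by omega)]
  · rw [if_neg (by exact_mod_cast fun h => hpq (by exact_mod_cast h))]
    rw [mergeInter_sorted_ofList]
    by_cases hlt : p < q
    · rw [if_pos ⟨hlt, by omega⟩]
      unfold entA; ring
    · rw [if_neg (by omega), if_pos ⟨by omega, by omega⟩]
      rw [entA_symm phis q p]
      unfold entA; ring

-- ===== VERDICT (by name: the statement is the Claim_ definition above) =====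
theorem rebuild_alpha_matrix_spec : Claim_equal_rebuild_alpha_matrix := by
  intro phis _
  unfold Spec_rebuild_alpha_matrix
  rw [rebuildA_eq_gmat, rebuildB_eq_gmat]
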